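-- pv_equiv track=rewrite | github.com/lbergaglio/pfi_mervAI | scrappers/scraper_iprofesional.py | detectar_empresas
-- ===== SOURCE A (Python) =====
-- def detectar_empresas(texto, equivalencias):
--     texto = texto.lower()
--     empresas = []
--     for empresa, sinonimos in equivalencias.items():
--         for s in sinonimos:
--             if s.lower() in texto:
--                 empresas.append(empresa)
--                 break
--     return empresas
-- ===== SOURCE B (Python) =====
-- def detectar_empresas(texto, equivalencias):
--     texto = texto.lower()
--     # lower every synonym once
--     low = [(e, [s.lower() for s in ss]) for e, ss in equivalencias.items()]
--     # scan each distinct lowered synonym against the text once, collect the matching ones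
--     matched = {p for p in {p for _, ps in low for p in ps} if p in texto}
--     # emit companies in dict order by set lookups only
--     return [e for e, ps in low if any(p in matched for p in ps)]
-- ===== Notes on version B (the rewrite author's own statement) =====
-- stated objective: alternative
-- what changed: B replaces A's nested loop-with-break by a two-phase design: lower every synonym once, scan each distinct lowered synonym against the text once to build a matched set, then emit companies in dict order by set-membership lookups.
import Mathlib
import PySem

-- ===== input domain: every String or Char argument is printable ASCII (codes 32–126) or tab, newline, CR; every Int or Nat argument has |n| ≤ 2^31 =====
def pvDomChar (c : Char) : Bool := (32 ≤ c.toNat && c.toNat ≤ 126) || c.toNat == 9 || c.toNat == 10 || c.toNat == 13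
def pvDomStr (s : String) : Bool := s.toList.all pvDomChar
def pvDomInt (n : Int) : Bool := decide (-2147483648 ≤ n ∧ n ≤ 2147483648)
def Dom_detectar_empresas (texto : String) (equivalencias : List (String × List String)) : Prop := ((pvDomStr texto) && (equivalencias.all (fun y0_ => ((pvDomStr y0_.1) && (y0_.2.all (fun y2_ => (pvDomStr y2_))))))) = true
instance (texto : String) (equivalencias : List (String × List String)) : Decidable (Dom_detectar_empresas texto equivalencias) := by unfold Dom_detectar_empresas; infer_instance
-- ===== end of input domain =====

-- B replaces A's nested loop-with-break by a two-phase design (collect the set of matching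
-- lowered synonyms once, then emit companies in dict order by set lookups): an alternative
-- decomposition of the same asymptotic cost (not measured faster); equivalence proved on all inputs.


-- ===== PORT A =====
-- inner 'for s in sinonimos: if …: append; break' = first-match search over the synonyms
def aAnyMatch (t : String) : List String → Bool
  | [] => false
  | s :: rest => if PySem.Str.isIn (PySem.Str.lower s) t then true else aAnyMatch t rest

def detectar_empresas (texto : String) (equivalencias : List (String × List String)) : List String :=
  let t := PySem.Str.lower texto
  equivalencias.foldl (fun acc p => if aAnyMatch t p.2 then acc ++ [p.1] else acc) []

-- ===== PORT B =====
def detectar_empresas_alt (texto : String) (equivalencias : List (String × List String)) : List String :=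
  let t := PySem.Str.lower texto
  let low := equivalencias.map (fun p => (p.1, p.2.map PySem.Str.lower))
  let pats : PySem.Set String := PySem.Set.ofList (low.flatMap (fun p => p.2))
  let matched : PySem.Set String := pats.filter (fun p => PySem.Str.isIn p t)
  (low.filter (fun p => p.2.any (fun s => PySem.Set.contains matched s))).map Prod.fst

-- ===== PRECONDITION & SPEC =====
def Spec_detectar_empresas (texto : String) (equivalencias : List (String × List String)) (out : List String) : Prop := out = detectar_empresas_alt texto equivalencias
instance (texto : String) (equivalencias : List (String × List String)) (out : List String) : Decidable (Spec_detectar_empresas texto equivalencias out) := by unfold Spec_detectar_empresas; infer_instance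

-- ===== CLAIM (what is proved, stated in full; the proofs are below) =====
def Claim_equal_detectar_empresas : Prop := ∀ (texto : String) (equivalencias : List (String × List String)), Dom_detectar_empresas texto equivalencias → Spec_detectar_empresas texto equivalencias (detectar_empresas texto equivalencias)

-- ===== LEMMAS AND PROOFS =====
theorem aAnyMatch_eq (t : String) (ss : List String) :
    aAnyMatch t ss = ss.any (fun s => PySem.Str.isIn (PySem.Str.lower s) t) := by
  induction ss with
  | nil => rfl
  | cons s rest ih => simp [aAnyMatch, ih]

-- a lowered synonym of some listed company is in the matched set iff it occurs in the text
theorem contains_matched (t : String) (equivalencias : List (String × List String))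
    (p : String × List String) (hp : p ∈ equivalencias) (s : String) (hs : s ∈ p.2) :
    PySem.Set.contains
      ((PySem.Set.ofList ((equivalencias.map (fun q => (q.1, q.2.map PySem.Str.lower))).flatMap
          (fun q => q.2))).filter (fun q => PySem.Str.isIn q t))
      (PySem.Str.lower s)
    = PySem.Str.isIn (PySem.Str.lower s) t := by
  have hmem : PySem.Str.lower s ∈
      (PySem.Set.ofList ((equivalencias.map (fun q => (q.1, q.2.map PySem.Str.lower))).flatMap
        (fun q => q.2)) : List String) := by
    rw [PySem.Set.mem_ofList]
    exact List.mem_flatMap.mpr ⟨(p.1, p.2.map PySem.Str.lower),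
      List.mem_map.mpr ⟨p, hp, rfl⟩, List.mem_map.mpr ⟨s, hs, rfl⟩⟩
  by_cases h : PySem.Str.isIn (PySem.Str.lower s) t = true
  · rw [h]
    rw [PySem.Set.contains_iff, List.mem_filter]
    exact ⟨hmem, h⟩
  · simp only [Bool.not_eq_true] at h
    rw [h]
    apply Bool.eq_false_iff.mpr
    intro hc
    rw [PySem.Set.contains_iff, List.mem_filter] at hc
    rw [hc.2] at h
    exact Bool.true_eq_false.mp h

-- ===== VERDICT (by name: the statement is the Claim_ definition above) =====
theorem detectar_empresas_spec : Claim_equal_detectar_empresas := by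
  intro texto equivalencias _
  show detectar_empresas texto equivalencias = detectar_empresas_alt texto equivalencias
  unfold detectar_empresas detectar_empresas_alt
  dsimp only
  rw [PySem.List.foldl_append_if, List.nil_append]
  simp only [List.filter_map, List.map_map]
  congr 1
  apply List.filter_congr
  intro p hp
  rw [aAnyMatch_eq]
  simp only [Function.comp_apply, List.any_map]
  exact (PySem.List.any_congr_mem (fun s hs =>
    (contains_matched (PySem.Str.lower texto) equivalencias p hp s hs).symm))
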